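-- pv_equiv track=rewrite | github.com/Kiru1288/NHL-Dynasty-Mode | backend/app/sim_engine/draft/scouting.py | _merge_flags
-- ===== SOURCE A (Python) =====
-- from typing import Any, Dict, List, Optional, Tuple
--
-- def _merge_flags(flag_lists: List[List[str]]) -> List[str]:
--     # keep flags that appear at least twice, unless it's "limited_viewings"
--     counts: Dict[str, int] = {}
--     for fl in flag_lists:
--         for f in fl:
--             counts[f] = counts.get(f, 0) + 1
--     out: List[str] = []
--     for f, c in counts.items():
--         if f == "limited_viewings":
--             if c >= 1:
--                 out.append(f)
--         elif c >= 2: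
--             out.append(f)
--     return out
-- ===== SOURCE B (Python) =====
-- from typing import List
--
-- def _merge_flags(flag_lists: List[List[str]]) -> List[str]:
--     # Pass 1: membership sets — everything seen, and what was seen more than once.
--     seen = set()
--     duplicates = set()
--     for fl in flag_lists:
--         for f in fl:
--             if f in seen:
--                 duplicates.add(f)
--             else:
--                 seen.add(f)
--     # Pass 2: emit each qualifying flag the first time it occurs, in input order.
--     out: List[str] = []
--     emitted = set()
--     for fl in flag_lists:
--         for f in fl:
--             if f not in emitted and (f == "limited_viewings" or f in duplicates):
--                 out.append(f)
--                 emitted.add(f)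
--     return out
-- ===== Notes on version B (the rewrite author's own statement) =====
-- stated objective: alternative
-- what changed: Replaces the count dictionary plus a scan over its items with two passes over the raw lists: pass one builds 'seen'/'duplicates' membership sets, pass two re-walks the input emitting each qualifying flag at its first occurrence.
import Mathlib
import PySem

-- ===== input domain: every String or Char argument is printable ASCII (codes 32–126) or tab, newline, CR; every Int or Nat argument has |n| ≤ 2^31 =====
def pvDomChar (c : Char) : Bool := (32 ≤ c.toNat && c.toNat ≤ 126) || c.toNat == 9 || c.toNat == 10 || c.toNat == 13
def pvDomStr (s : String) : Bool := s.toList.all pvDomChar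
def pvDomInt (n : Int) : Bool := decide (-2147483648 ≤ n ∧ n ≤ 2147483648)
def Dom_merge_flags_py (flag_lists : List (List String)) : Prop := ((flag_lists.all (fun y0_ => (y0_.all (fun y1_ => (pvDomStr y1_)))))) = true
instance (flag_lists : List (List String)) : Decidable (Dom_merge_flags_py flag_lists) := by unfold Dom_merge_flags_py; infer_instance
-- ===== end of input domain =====

-- B replaces A's count dictionary by two passes over the raw lists with membership sets (alternative decomposition, same cost).

-- ===== PORT A =====
def merge_flags_py (flag_lists : List (List String)) : List String :=
  let counts : PySem.Dict String Int :=
    flag_lists.foldl (fun counts fl =>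
      fl.foldl (fun counts f => counts.insert f (counts.getD f 0 + 1)) counts)
      PySem.Dict.empty
  counts.items.foldl (fun out p =>
    if p.1 == "limited_viewings" then
      (if p.2 ≥ 1 then out ++ [p.1] else out)
    else
      (if p.2 ≥ 2 then out ++ [p.1] else out)) []

-- ===== PORT B =====
-- loop body of B's first pass: classify f into seen / duplicates
def pvStep1 (sd : PySem.Set String × PySem.Set String) (f : String) :
    PySem.Set String × PySem.Set String :=
  if sd.1.contains f then (sd.1, sd.2.add f) else (sd.1.add f, sd.2)

-- loop body of B's second pass: emit f at its first qualifying occurrence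
def pvStep2 (dup : PySem.Set String) (oe : List String × PySem.Set String) (f : String) :
    List String × PySem.Set String :=
  if !oe.2.contains f && (f == "limited_viewings" || dup.contains f)
  then (oe.1 ++ [f], oe.2.add f) else oe

def merge_flags_py_alt (flag_lists : List (List String)) : List String :=
  let sd : PySem.Set String × PySem.Set String :=
    flag_lists.foldl (fun sd fl => fl.foldl pvStep1 sd)
      (PySem.Set.empty, PySem.Set.empty)
  let oe : List String × PySem.Set String :=
    flag_lists.foldl (fun oe fl => fl.foldl (pvStep2 sd.2) oe)
      ([], PySem.Set.empty)
  oe.1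

-- ===== PRECONDITION & SPEC =====
def Spec_merge_flags_py (flag_lists : List (List String)) (out : List String) : Prop := out = merge_flags_py_alt flag_lists
instance (flag_lists : List (List String)) (out : List String) : Decidable (Spec_merge_flags_py flag_lists out) := by unfold Spec_merge_flags_py; infer_instance

-- ===== CLAIM (what is proved, stated in full; the proofs are below) =====
def Claim_equal_merge_flags_py : Prop := ∀ (flag_lists : List (List String)), Dom_merge_flags_py flag_lists → Spec_merge_flags_py flag_lists (merge_flags_py flag_lists)

-- ===== LEMMAS AND PROOFS =====

-- the canonical value both programs compute: the first occurrences of the qualifying flags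
def pvPredK (xs : List String) (k : String) : Bool :=
  k == "limited_viewings" || decide (2 ≤ (List.count k xs : Int))

def pvCanon (xs : List String) : List String :=
  (PySem.Set.ofList xs).filter (pvPredK xs)

-- the fold behind Set.ofList from an arbitrary (possibly non-empty) start
theorem pvFoldl_add (xs : List String) : ∀ (s : PySem.Set String),
    List.foldl PySem.Set.add s xs =
      s ++ (PySem.Set.ofList xs).filter (fun y => !decide (y ∈ s)) := by
  induction xs with
  | nil => intro s; simp [PySem.Set.ofList]
  | cons x xs ih =>
    intro s
    have hx : PySem.Set.ofList (x :: xs) = List.foldl PySem.Set.add (PySem.Set.add [] x) xs := by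
      simp [PySem.Set.ofList_eq_foldl, List.foldl_cons]
    rw [List.foldl_cons, ih, hx, ih]
    have hbase : PySem.Set.add ([] : PySem.Set String) x = [x] := by
      simp [PySem.Set.add, PySem.Set.contains]
    rw [hbase]
    by_cases hmem : x ∈ s
    · have h1 : PySem.Set.add s x = s := by
        simp [PySem.Set.add, PySem.Set.contains, hmem]
      rw [h1]
      simp only [List.filter_append, List.filter_filter]
      congr 1
      rw [show List.filter (fun y => !decide (y ∈ s)) [x] = [] by simp [hmem]]
      rw [List.nil_append]
      apply (List.filter_congr ?_).symm
      intro y _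
      by_cases hyx : y = x
      · subst hyx; simp [hmem]
      · simp [hyx]
    · have h1 : PySem.Set.add s x = s ++ [x] := by
        simp [PySem.Set.add, PySem.Set.contains, hmem]
      rw [h1]
      simp only [List.filter_append, List.filter_filter, List.append_assoc]
      congr 1
      rw [show List.filter (fun y => !decide (y ∈ s)) [x] = [x] by simp [hmem]]
      congr 1
      apply List.filter_congr
      intro y _
      by_cases hyx : y = x
      · subst hyx; simp [hmem]
      · simp [hyx]

-- Set.ofList peels its head: first occurrence kept, later copies dropped
theorem pvOfList_cons (x : String) (xs : List String) :
    PySem.Set.ofList (x :: xs) = x :: (PySem.Set.ofList xs).filter (fun y => !decide (y = x)) := by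
  have hx : PySem.Set.ofList (x :: xs) = List.foldl PySem.Set.add (PySem.Set.add [] x) xs := by
    simp [PySem.Set.ofList_eq_foldl, List.foldl_cons]
  rw [hx, show PySem.Set.add ([] : PySem.Set String) x = [x] by
    simp [PySem.Set.add, PySem.Set.contains], pvFoldl_add]
  simp

-- ===== A's side: the dict pipeline computes pvCanon =====

def pvPredA (p : String × Int) : Bool :=
  if p.1 == "limited_viewings" then decide (1 ≤ p.2) else decide (2 ≤ p.2)

theorem pvA_eq_canon (flag_lists : List (List String)) :
    merge_flags_py flag_lists = pvCanon flag_lists.flatten := by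
  unfold merge_flags_py
  have hcnt :
      flag_lists.foldl (fun counts fl =>
        fl.foldl (fun counts f => counts.insert f (counts.getD f 0 + 1)) counts)
        PySem.Dict.empty = PySem.Dict.counter flag_lists.flatten := by
    rw [← List.foldl_flatten]
    exact PySem.Dict.foldl_insert_getD_add_one_eq_counter _
  simp only [hcnt]
  have hbody :
      (fun (out : List String) (p : String × Int) =>
        if p.1 == "limited_viewings" then
          (if p.2 ≥ 1 then out ++ [p.1] else out)
        else
          (if p.2 ≥ 2 then out ++ [p.1] else out)) =
      (fun (out : List String) (p : String × Int) =>
        if pvPredA p then out ++ [p.1] else out) := by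
    funext out p
    unfold pvPredA
    by_cases h1 : p.1 == "limited_viewings" <;> simp [h1, ge_iff_le]
  rw [hbody, PySem.List.foldl_append_if pvPredA (fun p => p.1) _ [],
    PySem.Dict.items_counter, List.filter_map, List.map_map, List.nil_append]
  have hmapid : ((fun (p : String × Int) => p.1) ∘
      (fun k => (k, (List.count k flag_lists.flatten : Int)))) = fun k => k := rfl
  rw [hmapid, List.map_id']
  unfold pvCanon
  apply List.filter_congr
  intro k hk
  have hkxs : k ∈ flag_lists.flatten := (PySem.Set.mem_ofList _ k).mp hk
  have hc1 : 1 ≤ List.count k flag_lists.flatten := List.one_le_count_iff.mpr hkxs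
  simp only [Function.comp, pvPredA, pvPredK]
  by_cases h1 : k == "limited_viewings"
  · simp only [h1, if_true, Bool.true_or]
    simp only [decide_eq_true_eq]
    exact_mod_cast hc1
  · simp [h1]

-- ===== B's side: the two set passes compute pvCanon =====

-- after pass one, the duplicates set holds exactly what was seen at least twice
theorem pvStep1_dup (xs : List String) : ∀ (seen dup : PySem.Set String) (g : String),
    g ∈ (xs.foldl pvStep1 (seen, dup)).2 ↔
      g ∈ dup ∨ (g ∈ seen ∧ g ∈ xs) ∨ 2 ≤ List.count g xs := by
  induction xs with
  | nil => intro seen dup g; simp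
  | cons f t ih =>
    intro seen dup g
    rw [List.foldl_cons]
    by_cases hf : f ∈ seen
    · rw [show pvStep1 (seen, dup) f = (seen, dup.add f) by
        simp [pvStep1, PySem.Set.contains, hf]]
      rw [ih, PySem.Set.mem_add]
      by_cases hgf : g = f
      · subst hgf
        simp [hf, List.count_cons_self]
      · have hfg : ¬f = g := fun h => hgf h.symm
        simp only [List.mem_cons, List.count_cons, hgf, beq_iff_eq, hfg, if_false, Nat.add_zero]
        tauto
    · rw [show pvStep1 (seen, dup) f = (seen.add f, dup) by
        simp [pvStep1, PySem.Set.contains, hf]]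
      rw [ih]
      by_cases hgf : g = f
      · subst hgf
        have hcnt : g ∈ t ↔ 1 ≤ List.count g t := List.one_le_count_iff.symm
        simp only [PySem.Set.mem_add, List.mem_cons, List.count_cons_self]
        constructor
        · rintro (h | ⟨-, ht⟩ | h)
          · exact Or.inl h
          · exact Or.inr (Or.inr (by have := hcnt.mp ht; omega))
          · exact Or.inr (Or.inr (by omega))
        · rintro (h | ⟨hs, -⟩ | h)
          · exact Or.inl h
          · exact absurd hs hf
          · exact Or.inr (Or.inl ⟨Or.inr trivial, hcnt.mpr (by omega)⟩)
      · have hfg : ¬f = g := fun h => hgf h.symm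
        simp only [PySem.Set.mem_add, List.mem_cons, List.count_cons, hgf, beq_iff_eq, hfg,
          if_false, Nat.add_zero]
        tauto

-- pass two appends, in first-occurrence order, the not-yet-emitted flags the predicate accepts
theorem pvStep2_out (dup : PySem.Set String) (xs : List String) :
    ∀ (out : List String) (em : PySem.Set String),
    (xs.foldl (pvStep2 dup) (out, em)).1 =
      out ++ (PySem.Set.ofList xs).filter
        (fun g => !decide (g ∈ em) && (g == "limited_viewings" || decide (g ∈ dup))) := by
  induction xs with
  | nil => intro out em; simp [PySem.Set.ofList]
  | cons f t ih =>
    intro out em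
    rw [List.foldl_cons, pvOfList_cons, List.filter_cons]
    have hcond : (!PySem.Set.contains em f && (f == "limited_viewings" || PySem.Set.contains dup f))
        = (!decide (f ∈ em) && (f == "limited_viewings" || decide (f ∈ dup))) := by
      simp [PySem.Set.contains]
    by_cases hq : (!decide (f ∈ em) && (f == "limited_viewings" || decide (f ∈ dup))) = true
    · rw [show pvStep2 dup (out, em) f = (out ++ [f], em.add f) by
        simp only [pvStep2, hcond, hq]; rfl]
      rw [ih]
      simp only [hq, if_true, List.append_assoc, List.singleton_append, List.filter_filter]
      congr 2
      apply List.filter_congr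
      intro g _
      by_cases hgf : g = f
      · subst hgf
        simp only [Bool.and_eq_true, Bool.not_eq_true'] at hq
        simp [PySem.Set.mem_add]
      · simp [PySem.Set.mem_add, hgf]
    · have hq' : (!decide (f ∈ em) && (f == "limited_viewings" || decide (f ∈ dup))) = false :=
        Bool.eq_false_iff.mpr hq
      rw [show pvStep2 dup (out, em) f = (out, em) by
        simp only [pvStep2, hcond, hq']; rfl]
      rw [ih]
      simp only [hq', Bool.false_eq_true, if_false, List.filter_filter]
      congr 1
      apply (List.filter_congr ?_).symm
      intro g _
      by_cases hgf : g = f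
      · subst hgf
        simp [hq']
      · simp [hgf]

theorem pvB_eq_canon (flag_lists : List (List String)) :
    merge_flags_py_alt flag_lists = pvCanon flag_lists.flatten := by
  simp only [merge_flags_py_alt]
  rw [← List.foldl_flatten, ← List.foldl_flatten]
  rw [pvStep2_out]
  unfold pvCanon
  rw [List.nil_append]
  apply List.filter_congr
  intro g hg
  have hdup := pvStep1_dup flag_lists.flatten PySem.Set.empty PySem.Set.empty g
  simp only [PySem.Set.empty, List.not_mem_nil, false_and, false_or] at hdup
  unfold pvPredK
  rw [show (PySem.Set.empty : PySem.Set String) = [] from rfl]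
  simp only [List.not_mem_nil, decide_false, Bool.not_false, Bool.true_and]
  congr 1
  rw [decide_eq_decide]
  rw [hdup]
  constructor
  · intro h; exact_mod_cast h
  · intro h; exact_mod_cast h

-- ===== VERDICT (by name: the statement is the Claim_ definition above) =====
theorem merge_flags_py_spec : Claim_equal_merge_flags_py := by
  intro flag_lists _
  unfold Spec_merge_flags_py
  rw [pvA_eq_canon, pvB_eq_canon]
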